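-- pv_equiv track=rewrite | github.com/lehancode/uba_computacion | python/practica7.py | pos_minimo
-- ===== SOURCE A (Python) =====
-- def pos_minimo(s: list[int]) -> int:
--   if len(s) == 0:
--     return -1
--   else:
--     indice: int = 0
--     for i in range(1, len(s)):
--       if s[i] <= s[indice]:
--         indice = i
--   return indice
-- ===== SOURCE B (Python) =====
-- def pos_minimo(s: list[int]) -> int:
--   if not s:
--     return -1
--   m = min(s)
--   return len(s) - 1 - s[::-1].index(m)
-- ===== Notes on version B (the rewrite author's own statement) =====
-- stated objective: simpler
-- what changed: Replaces the single running-minimum index loop by two library passes: min(s) to get the value, then the first occurrence in the reversed list to get the last index of that value.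
import Mathlib
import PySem

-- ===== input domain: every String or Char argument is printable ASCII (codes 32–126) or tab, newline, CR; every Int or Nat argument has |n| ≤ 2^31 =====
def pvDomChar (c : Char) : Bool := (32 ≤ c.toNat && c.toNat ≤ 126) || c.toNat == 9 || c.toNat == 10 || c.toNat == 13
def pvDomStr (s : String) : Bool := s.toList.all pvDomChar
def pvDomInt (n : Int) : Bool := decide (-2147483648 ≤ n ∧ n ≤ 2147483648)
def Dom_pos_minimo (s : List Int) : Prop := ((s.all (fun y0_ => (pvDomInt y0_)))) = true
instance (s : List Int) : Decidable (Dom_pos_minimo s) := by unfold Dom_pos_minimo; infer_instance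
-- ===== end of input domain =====

-- B is simpler: two library passes (min value, then last position via the reversed list)
-- instead of A's hand-rolled running-minimum-index loop. Same O(n) cost.


-- ===== PORT A =====
-- literal port: indices produced by the loop are always in range, so pyGetD's default is never used
def pos_minimo (s : List Int) : Int :=
  if s.length = 0 then -1
  else
    (PySem.List.pyRange 1 s.length 1).foldl
      (fun indice i =>
        if PySem.List.pyGetD s i 0 ≤ PySem.List.pyGetD s indice 0 then i else indice) 0

-- ===== PORT B =====
-- s[::-1] is s.reverse (PySem.List.slice?_none_none_neg_one); .index on the reversed list is
-- PySem.List.index?; the inner 'none' branch is Python's ValueError, unreachable since min ∈ s.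
def pos_minimo_alt (s : List Int) : Int :=
  match PySem.List.min? s (fun x => x) with
  | none => -1
  | some m =>
    match PySem.List.index? s.reverse m with
    | none => -1
    | some j => (s.length : Int) - 1 - (j : Int)

-- ===== PRECONDITION & SPEC =====
def Spec_pos_minimo (s : List Int) (out : Int) : Prop := out = pos_minimo_alt s
instance (s : List Int) (out : Int) : Decidable (Spec_pos_minimo s out) := by unfold Spec_pos_minimo; infer_instance

-- ===== CLAIM (what is proved, stated in full; the proofs are below) =====
def Claim_equal_pos_minimo : Prop := ∀ (s : List Int), Dom_pos_minimo s → Spec_pos_minimo s (pos_minimo s)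

-- ===== LEMMAS AND PROOFS =====

-- "k is the last index of the minimum of s"
def pvLastMin (s : List Int) (k : Nat) : Prop :=
  k < s.length ∧ (∀ j, j < s.length → s.getD k 0 ≤ s.getD j 0) ∧
    (∀ j, k < j → j < s.length → s.getD k 0 < s.getD j 0)

theorem pvLastMin_unique (s : List Int) (k1 k2 : Nat)
    (h1 : pvLastMin s k1) (h2 : pvLastMin s k2) : k1 = k2 := by
  obtain ⟨hk1, hmin1, hstr1⟩ := h1
  obtain ⟨hk2, hmin2, hstr2⟩ := h2
  rcases lt_trichotomy k1 k2 with h | h | h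
  · exact absurd (hmin2 k1 hk1) (not_le.mpr (hstr1 k2 h hk2))
  · exact h
  · exact absurd (hmin1 k2 hk2) (not_le.mpr (hstr2 k1 h hk1))

-- the running-minimum loop of A yields a last-min index of the first n elements
theorem pvLoopA (s : List Int) (n : Nat) (hn : 1 ≤ n) :
    ∃ k : Nat,
      (PySem.List.pyRange 1 (n : Int) 1).foldl
        (fun indice i =>
          if PySem.List.pyGetD s i 0 ≤ PySem.List.pyGetD s indice 0 then i else indice) 0
        = (k : Int) ∧ k < n ∧ (∀ j, j < n → s.getD k 0 ≤ s.getD j 0) ∧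
        (∀ j, k < j → j < n → s.getD k 0 < s.getD j 0) := by
  induction n with
  | zero => omega
  | succ n ih =>
    by_cases h1 : 1 ≤ n
    · obtain ⟨k, hfold, hk, hmin, hstr⟩ := ih h1
      have hsplit : PySem.List.pyRange 1 ((n : Int) + 1) 1
          = PySem.List.pyRange 1 (n : Int) 1 ++ [(n : Int)] :=
        PySem.List.pyRange_one_succ_right (by exact_mod_cast h1)
      push_cast
      rw [hsplit, List.foldl_append, hfold]
      simp only [List.foldl_cons, List.foldl_nil, PySem.List.pyGetD_natCast]
      by_cases hle : s.getD n 0 ≤ s.getD k 0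
      · refine ⟨n, by rw [if_pos hle], by omega, ?_, by omega⟩
        intro j hj
        rcases Nat.lt_succ_iff_lt_or_eq.mp hj with hj | hj
        · exact le_trans hle (hmin j hj)
        · simp [hj]
      · refine ⟨k, by rw [if_neg hle], by omega, ?_, ?_⟩
        · intro j hj
          rcases Nat.lt_succ_iff_lt_or_eq.mp hj with hj | hj
          · exact hmin j hj
          · subst hj; exact le_of_lt (not_le.mp hle)
        · intro j hkj hj
          rcases Nat.lt_succ_iff_lt_or_eq.mp hj with hj | hj
          · exact hstr j hkj hj
          · subst hj; exact not_le.mp hle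
    · have hn1 : n = 0 := by omega
      subst hn1
      refine ⟨0, ?_, by omega, ?_, by omega⟩
      · have h0 : ((0 + 1 : Nat) : Int) = 1 := by norm_num
        rw [h0, PySem.List.pyRange_one_eq_nil (le_refl 1)]
        simp
      · intro j hj
        interval_cases j
        exact le_refl _

-- B's formula yields a last-min index of s
theorem pvAltLastMin (s : List Int) (m : Int) (j : Nat)
    (hm : PySem.List.min? s (fun x => x) = some m)
    (hj : PySem.List.index? s.reverse m = some j) :
    pvLastMin s (s.length - 1 - j) := by
  rw [PySem.List.index?_eq_some_iff] at hj
  obtain ⟨pre, suf, hrev, hlen, hmem⟩ := hj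
  have hs : s = suf.reverse ++ m :: pre.reverse := by
    have := congrArg List.reverse hrev
    simpa using this
  have hslen : s.length = suf.length + 1 + pre.length := by
    rw [hs]; simp; omega
  have hkey : s.length - 1 - j = suf.length := by omega
  rw [hkey]
  have hget : s.getD suf.length 0 = m := by
    rw [hs, List.getD_eq_getElem?_getD]
    rw [List.getElem?_append_right (by simp)]
    simp
  refine ⟨by omega, ?_, ?_⟩
  · intro i hi
    rw [hget]
    have : s.getD i 0 ∈ s := by
      rw [List.getD_eq_getElem?_getD, List.getElem?_eq_getElem hi]
      exact List.getElem_mem hi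
    exact PySem.List.min?_isMin hm _ this
  · intro i hlt hi
    rw [hget]
    have hne : s.getD i 0 ≠ m := by
      have hsufr : suf.reverse.length = suf.length := by simp
      rw [hs, List.getD_eq_getElem?_getD]
      rw [List.getElem?_append_right (by rw [hsufr]; omega)]
      have hi' : i - suf.reverse.length < (m :: pre.reverse).length := by
        simp only [List.length_reverse, List.length_cons]; omega
      rw [List.getElem?_eq_getElem hi']
      have hne0 : i - suf.reverse.length ≠ 0 := by rw [hsufr]; omega
      rcases Nat.exists_eq_succ_of_ne_zero hne0 with ⟨t, ht⟩
      rw [hsufr] at ht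
      have htlt : t < pre.reverse.length := by
        simp only [List.length_reverse]; omega
      simp only [Option.getD_some]
      have hidx : (m :: pre.reverse)[i - suf.reverse.length]'hi' = pre.reverse[t]'htlt := by
        simp only [hsufr, ht, List.getElem_cons_succ]
      rw [hidx]
      intro hc
      exact hmem (List.mem_reverse.mp (hc ▸ List.getElem_mem htlt))
    have hmemi : s.getD i 0 ∈ s := by
      rw [List.getD_eq_getElem?_getD, List.getElem?_eq_getElem hi]
      exact List.getElem_mem hi
    exact lt_of_le_of_ne (PySem.List.min?_isMin hm _ hmemi) (Ne.symm hne)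

-- ===== VERDICT (by name: the statement is the Claim_ definition above) =====
theorem pos_minimo_spec : Claim_equal_pos_minimo := by
  intro s _
  unfold Spec_pos_minimo pos_minimo pos_minimo_alt
  rcases hm : PySem.List.min? s (fun x => x) with _ | m
  · rw [PySem.List.min?_eq_none_iff] at hm
    subst hm
    simp
  · have hne : s ≠ [] := List.ne_nil_of_mem (PySem.List.min?_mem hm)
    have hlen : s.length ≠ 0 := by simpa using hne
    simp only [if_neg hlen]
    have hmem : m ∈ s.reverse := List.mem_reverse.mpr (PySem.List.min?_mem hm)
    rcases hj : PySem.List.index? s.reverse m with _ | j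
    · rw [PySem.List.index?_eq_none_iff] at hj
      exact absurd hmem hj
    · obtain ⟨k, hfold, hk, hmin, hstr⟩ := pvLoopA s s.length (by omega)
      have hA : pvLastMin s k := ⟨hk, hmin, hstr⟩
      have hB := pvAltLastMin s m j hm hj
      have hkeq := pvLastMin_unique s k (s.length - 1 - j) hA hB
      have hjlt : j < s.length := by
        have hj' := hj
        rw [PySem.List.index?_eq_some_iff] at hj'
        obtain ⟨pre, suf, hrev, hlenp, _⟩ := hj'
        have := congrArg List.length hrev
        simp at this; omega
      rw [hfold, hkeq]
      show ((s.length - 1 - j : Nat) : Int) = (s.length : Int) - 1 - (j : Int)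
      omega
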